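-- pv_equiv track=rewrite | github.com/seanebones-lang/lobo1 | src/federated/privacy.py | generalize_medical_query
-- ===== SOURCE A (Python) =====
-- def generalize_medical_query(query: str) -> str:
--     """Apply medical-specific generalization"""
--     medical_generalizations = {
--         'patient': 'individual',
--         'diagnosis': 'medical condition',
--         'treatment': 'medical intervention',
--         'symptoms': 'clinical presentation'
--     }
--
--     for specific, general in medical_generalizations.items():
--         query = query.replace(specific, general)
--
--     return query
-- ===== SOURCE B (Python) =====
-- def generalize_medical_query(query: str) -> str:
--     """Apply medical-specific generalization in a single left-to-right pass."""
--     table = [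
--         ('patient', 'individual'),
--         ('diagnosis', 'medical condition'),
--         ('treatment', 'medical intervention'),
--         ('symptoms', 'clinical presentation'),
--     ]
--     out = []
--     i = 0
--     n = len(query)
--     while i < n:
--         for specific, general in table:
--             if query.startswith(specific, i):
--                 out.append(general)
--                 i += len(specific)
--                 break
--         else:
--             out.append(query[i])
--             i += 1
--     return ''.join(out)
-- ===== Notes on version B (the rewrite author's own statement) =====
-- stated objective: alternative
-- what changed: A runs four sequential full-string replace passes (one per medical term); B makes a single left-to-right scan that at each position emits the replacement of the first matching key (valid because no replacement text can create or overlap a key occurrence).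
import Mathlib
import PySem

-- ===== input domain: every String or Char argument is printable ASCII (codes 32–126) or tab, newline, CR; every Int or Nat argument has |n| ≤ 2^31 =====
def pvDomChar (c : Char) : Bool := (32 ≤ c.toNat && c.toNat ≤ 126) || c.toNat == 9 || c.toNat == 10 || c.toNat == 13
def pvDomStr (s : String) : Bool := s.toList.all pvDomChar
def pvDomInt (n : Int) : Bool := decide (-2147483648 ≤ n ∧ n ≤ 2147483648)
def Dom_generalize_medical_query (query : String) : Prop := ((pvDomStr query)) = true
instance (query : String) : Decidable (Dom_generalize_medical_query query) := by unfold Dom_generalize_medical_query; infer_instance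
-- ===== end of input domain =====

-- B replaces A's four sequential full-string replace passes by one left-to-right scan
-- that emits the replacement of the first matching key at each position (objective: alternative).

-- ===== PORT A =====
def generalize_medical_query (query : String) : String :=
  let q1 := PySem.Str.replace query "patient" "individual"
  let q2 := PySem.Str.replace q1 "diagnosis" "medical condition"
  let q3 := PySem.Str.replace q2 "treatment" "medical intervention"
  let q4 := PySem.Str.replace q3 "symptoms" "clinical presentation"
  q4

-- ===== PORT B =====
-- the single pass of Source B: at each position try the keys in table order; on a match
-- emit the replacement and skip the key, otherwise emit the character
def gmqScan : List Char → List Char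
  | [] => []
  | c :: t =>
    if ("patient".toList).isPrefixOf (c :: t) then "individual".toList ++ gmqScan (t.drop 6)
    else if ("diagnosis".toList).isPrefixOf (c :: t) then "medical condition".toList ++ gmqScan (t.drop 8)
    else if ("treatment".toList).isPrefixOf (c :: t) then "medical intervention".toList ++ gmqScan (t.drop 8)
    else if ("symptoms".toList).isPrefixOf (c :: t) then "clinical presentation".toList ++ gmqScan (t.drop 7)
    else c :: gmqScan t
termination_by s => s.length
decreasing_by all_goals simp [List.length_drop]

def generalize_medical_query_alt (query : String) : String :=
  String.ofList (gmqScan query.toList)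

-- ===== PRECONDITION & SPEC =====
def Spec_generalize_medical_query (query : String) (out : String) : Prop := out = generalize_medical_query_alt query
instance (query : String) (out : String) : Decidable (Spec_generalize_medical_query query out) := by unfold Spec_generalize_medical_query; infer_instance

-- ===== CLAIM (what is proved, stated in full; the proofs are below) =====
def Claim_equal_generalize_medical_query : Prop := ∀ (query : String), Dom_generalize_medical_query query → Spec_generalize_medical_query query (generalize_medical_query query)

-- ===== LEMMAS AND PROOFS =====

-- fuel-free structural model of PySem.Chars.replace (for nonempty pattern)
def gmqRep (old new : List Char) : List Char → List Char
  | [] => []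
  | c :: t =>
    if old.isPrefixOf (c :: t) then new ++ gmqRep old new (t.drop (old.length - 1))
    else c :: gmqRep old new t
termination_by s => s.length
decreasing_by all_goals simp [List.length_drop]

theorem gmqRep_go (old new : List Char) (hold : old ≠ []) :
    ∀ (fuel : Nat) (s acc : List Char), s.length ≤ fuel →
      PySem.Chars.replace.go old new fuel s acc = acc.reverse ++ gmqRep old new s := by
  intro fuel
  induction fuel with
  | zero =>
    intro s acc hs
    have : s = [] := List.eq_nil_of_length_eq_zero (Nat.le_zero.mp hs)
    subst this
    simp [PySem.Chars.replace.go, gmqRep]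
  | succ n ih =>
    intro s acc hs
    match s with
    | [] => simp [PySem.Chars.replace.go, gmqRep]
    | c :: t =>
      by_cases hp : old.isPrefixOf (c :: t) = true
      · obtain ⟨m, hm⟩ : ∃ m, old.length = m + 1 := ⟨old.length - 1, by cases old <;> simp_all⟩
        have hdrop : (c :: t).drop old.length = t.drop (old.length - 1) := by
          rw [hm]; simp
        rw [PySem.Chars.replace.go, if_pos hp, hdrop,
            ih _ _ (by simp at hs ⊢; omega), gmqRep, if_pos hp]
        simp
      · rw [PySem.Chars.replace.go, if_neg hp, ih _ _ (by simp at hs ⊢; omega),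
            gmqRep, if_neg hp]
        simp

theorem replace_eq_gmqRep (s old new : List Char) (hold : old ≠ []) :
    PySem.Chars.replace s old new = gmqRep old new s := by
  rw [PySem.Chars.replace, if_neg (by simpa using hold)]
  simpa using gmqRep_go old new hold s.length s [] le_rfl

theorem gmqRep_nil (old new : List Char) : gmqRep old new [] = [] := by rw [gmqRep]

theorem gmqRep_cons_neg (old new : List Char) (c : Char) (t : List Char)
    (h : ¬ old <+: (c :: t)) :
    gmqRep old new (c :: t) = c :: gmqRep old new t := by
  rw [gmqRep, if_neg (by simpa [List.isPrefixOf_iff_prefix] using h)]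

theorem gmqRep_append_match (old new x : List Char) (hold : old ≠ []) :
    gmqRep old new (old ++ x) = new ++ gmqRep old new x := by
  match old with
  | [] => exact absurd rfl hold
  | a :: o =>
    rw [List.cons_append, gmqRep,
        if_pos (by simp [List.isPrefixOf_iff_prefix])]
    simp

-- lit is "inert" for pattern p: no occurrence of p can start inside lit,
-- whatever follows lit
def gmqInert (lit p : List Char) : Bool :=
  (List.range lit.length).all
    (fun i => !(p.isPrefixOf (lit.drop i)) && !((lit.drop i).isPrefixOf p))

theorem gmqRep_append_of_inert (p r : List Char) :
    ∀ (lit : List Char), gmqInert lit p = true →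
      ∀ x, gmqRep p r (lit ++ x) = lit ++ gmqRep p r x := by
  intro lit
  induction lit with
  | nil => intro _ x; simp
  | cons c lit' ih =>
    intro h x
    have h0 := (List.all_eq_true.mp h) 0 (by simp [List.mem_range])
    simp only [List.drop_zero, Bool.and_eq_true, Bool.not_eq_true'] at h0
    have hnp : ¬ p <+: (c :: lit') ++ x := by
      intro hpre
      rcases List.prefix_or_prefix_of_prefix hpre (List.prefix_append (c :: lit') x) with h1 | h1
      · exact absurd ((List.isPrefixOf_iff_prefix).mpr h1) (by simp [h0.1])
      · exact absurd ((List.isPrefixOf_iff_prefix).mpr h1) (by simp [h0.2])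
    have htail : gmqInert lit' p = true := by
      refine List.all_eq_true.mpr ?_
      intro i hi
      have := (List.all_eq_true.mp h) (i + 1) (by simp [List.mem_range] at hi ⊢; omega)
      simpa using this
    rw [List.cons_append, gmqRep_cons_neg p r c (lit' ++ x) (by simpa using hnp),
        ih htail x]
    simp

-- separation of (old → new) from key k: no nonempty suffix of k is
-- prefix-comparable with new; then a replace pass cannot create a new
-- prefix-occurrence of any suffix of k
def gmqSep (new k : List Char) : Bool :=
  k.tails.all (fun w => w.isEmpty || (!(w.isPrefixOf new) && !(new.isPrefixOf w)))

theorem gmqRep_pres_suffix_prefix (old new k : List Char) (_hold : old ≠ [])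
    (hsep : gmqSep new k = true) :
    ∀ (s w : List Char), w <:+ k → w <+: gmqRep old new s → w <+: s := by
  intro s
  induction hs : s.length using Nat.strong_induction_on generalizing s with
  | _ n ih =>
  subst hs
  match s with
  | [] =>
    intro w _ hw
    rw [gmqRep_nil] at hw
    exact hw
  | c :: t =>
    intro w hwk hw
    by_cases hp : old.isPrefixOf (c :: t) = true
    · rw [gmqRep, if_pos hp] at hw
      match w with
      | [] => exact List.nil_prefix
      | a :: w' =>
        exfalso
        have hmem := (List.all_eq_true.mp hsep) (a :: w')
          ((List.mem_tails _ _).mpr hwk)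
        simp only [List.isEmpty_cons, Bool.false_or, Bool.and_eq_true,
          Bool.not_eq_true'] at hmem
        rcases List.prefix_or_prefix_of_prefix hw
            (List.prefix_append new _) with h1 | h1
        · exact absurd ((List.isPrefixOf_iff_prefix).mpr h1) (by simp [hmem.1])
        · exact absurd ((List.isPrefixOf_iff_prefix).mpr h1) (by simp [hmem.2])
    · rw [gmqRep, if_neg hp] at hw
      match w with
      | [] => exact List.nil_prefix
      | a :: w' =>
        obtain ⟨rfl, hw'⟩ := List.cons_prefix_cons.mp hw
        have hw'k : w' <:+ k :=
          List.IsSuffix.trans ⟨[a], rfl⟩ hwk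
        have := ih t.length (by simp) t rfl w' hw'k hw'
        exact List.cons_prefix_cons.mpr ⟨rfl, this⟩

-- abbreviations for the four keys and replacements
def gmqK1 : List Char := "patient".toList
def gmqR1 : List Char := "individual".toList
def gmqK2 : List Char := "diagnosis".toList
def gmqR2 : List Char := "medical condition".toList
def gmqK3 : List Char := "treatment".toList
def gmqR3 : List Char := "medical intervention".toList
def gmqK4 : List Char := "symptoms".toList
def gmqR4 : List Char := "clinical presentation".toList

def gmqA (s : List Char) : List Char :=
  gmqRep gmqK4 gmqR4 (gmqRep gmqK3 gmqR3 (gmqRep gmqK2 gmqR2 (gmqRep gmqK1 gmqR1 s)))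

-- a replace pass over t cannot create a fresh prefix-occurrence of key k at c :: t
theorem gmqNoNew (old new k : List Char) (hold : old ≠ []) (hsep : gmqSep new k = true)
    (c : Char) (t : List Char) (hk : ¬ k <+: c :: t) : ¬ k <+: c :: gmqRep old new t := by
  intro h
  match k with
  | [] => exact hk List.nil_prefix
  | a :: w =>
    obtain ⟨rfl, hw⟩ := List.cons_prefix_cons.mp h
    exact hk (List.cons_prefix_cons.mpr ⟨rfl,
      gmqRep_pres_suffix_prefix old new (a :: w) hold hsep t w ⟨[a], rfl⟩ hw⟩)

theorem gmqA_eq_scan : ∀ s, gmqA s = gmqScan s := by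
  intro s
  induction hs : s.length using Nat.strong_induction_on generalizing s with
  | _ n ih =>
  subst hs
  match s with
  | [] => simp [gmqA, gmqRep_nil, gmqScan, gmqK1, gmqK2, gmqK3, gmqK4]
  | c :: t =>
    by_cases h1 : gmqK1 <+: c :: t
    · obtain ⟨x, hx⟩ := h1
      have h7 : (c :: t).drop 7 = x := by rw [← hx, show (7:Nat) = gmqK1.length from by decide]; exact List.drop_left
      have hdx : t.drop 6 = x := h7
      have hxl : x.length < t.length + 1 := by
        have := congrArg List.length hx; simp [gmqK1] at this; omega
      have hA : gmqA (c :: t) = gmqR1 ++ gmqA x := by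
        rw [← hx]; unfold gmqA
        rw [gmqRep_append_match _ _ _ (by decide),
            gmqRep_append_of_inert gmqK2 gmqR2 gmqR1 (by decide),
            gmqRep_append_of_inert gmqK3 gmqR3 gmqR1 (by decide),
            gmqRep_append_of_inert gmqK4 gmqR4 gmqR1 (by decide)]
      have hp : ("patient".toList).isPrefixOf (c :: t) = true := by
        rw [List.isPrefixOf_iff_prefix]; exact ⟨x, hx⟩
      have hscan : gmqScan (c :: t) = gmqR1 ++ gmqScan x := by
        rw [gmqScan, if_pos hp, hdx]; rfl
      rw [hA, hscan, ih x.length hxl x rfl]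
    · by_cases h2 : gmqK2 <+: c :: t
      · obtain ⟨x, hx⟩ := h2
        have h9 : (c :: t).drop 9 = x := by rw [← hx, show (9:Nat) = gmqK2.length from by decide]; exact List.drop_left
        have hdx : t.drop 8 = x := h9
        have hxl : x.length < t.length + 1 := by
          have := congrArg List.length hx; simp [gmqK2] at this; omega
        have hA : gmqA (c :: t) = gmqR2 ++ gmqA x := by
          rw [← hx]; unfold gmqA
          rw [gmqRep_append_of_inert gmqK1 gmqR1 gmqK2 (by decide),
              gmqRep_append_match _ _ _ (by decide),
              gmqRep_append_of_inert gmqK3 gmqR3 gmqR2 (by decide),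
              gmqRep_append_of_inert gmqK4 gmqR4 gmqR2 (by decide)]
        have hp : ("diagnosis".toList).isPrefixOf (c :: t) = true := by
          rw [List.isPrefixOf_iff_prefix]; exact ⟨x, hx⟩
        have hn1 : ¬ ("patient".toList).isPrefixOf (c :: t) = true := by
          simpa [List.isPrefixOf_iff_prefix, gmqK1] using h1
        have hscan : gmqScan (c :: t) = gmqR2 ++ gmqScan x := by
          rw [gmqScan, if_neg hn1, if_pos hp, hdx]; rfl
        rw [hA, hscan, ih x.length hxl x rfl]
      · by_cases h3 : gmqK3 <+: c :: t
        · obtain ⟨x, hx⟩ := h3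
          have h9 : (c :: t).drop 9 = x := by rw [← hx, show (9:Nat) = gmqK3.length from by decide]; exact List.drop_left
          have hdx : t.drop 8 = x := h9
          have hxl : x.length < t.length + 1 := by
            have := congrArg List.length hx; simp [gmqK3] at this; omega
          have hA : gmqA (c :: t) = gmqR3 ++ gmqA x := by
            rw [← hx]; unfold gmqA
            rw [gmqRep_append_of_inert gmqK1 gmqR1 gmqK3 (by decide),
                gmqRep_append_of_inert gmqK2 gmqR2 gmqK3 (by decide),
                gmqRep_append_match _ _ _ (by decide),
                gmqRep_append_of_inert gmqK4 gmqR4 gmqR3 (by decide)]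
          have hp : ("treatment".toList).isPrefixOf (c :: t) = true := by
            rw [List.isPrefixOf_iff_prefix]; exact ⟨x, hx⟩
          have hn1 : ¬ ("patient".toList).isPrefixOf (c :: t) = true := by
            simpa [List.isPrefixOf_iff_prefix, gmqK1] using h1
          have hn2 : ¬ ("diagnosis".toList).isPrefixOf (c :: t) = true := by
            simpa [List.isPrefixOf_iff_prefix, gmqK2] using h2
          have hscan : gmqScan (c :: t) = gmqR3 ++ gmqScan x := by
            rw [gmqScan, if_neg hn1, if_neg hn2, if_pos hp, hdx]; rfl
          rw [hA, hscan, ih x.length hxl x rfl]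
        · by_cases h4 : gmqK4 <+: c :: t
          · obtain ⟨x, hx⟩ := h4
            have h8 : (c :: t).drop 8 = x := by rw [← hx, show (8:Nat) = gmqK4.length from by decide]; exact List.drop_left
            have hdx : t.drop 7 = x := h8
            have hxl : x.length < t.length + 1 := by
              have := congrArg List.length hx; simp [gmqK4] at this; omega
            have hA : gmqA (c :: t) = gmqR4 ++ gmqA x := by
              rw [← hx]; unfold gmqA
              rw [gmqRep_append_of_inert gmqK1 gmqR1 gmqK4 (by decide),
                  gmqRep_append_of_inert gmqK2 gmqR2 gmqK4 (by decide),
                  gmqRep_append_of_inert gmqK3 gmqR3 gmqK4 (by decide),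
                  gmqRep_append_match _ _ _ (by decide)]
            have hp : ("symptoms".toList).isPrefixOf (c :: t) = true := by
              rw [List.isPrefixOf_iff_prefix]; exact ⟨x, hx⟩
            have hn1 : ¬ ("patient".toList).isPrefixOf (c :: t) = true := by
              simpa [List.isPrefixOf_iff_prefix, gmqK1] using h1
            have hn2 : ¬ ("diagnosis".toList).isPrefixOf (c :: t) = true := by
              simpa [List.isPrefixOf_iff_prefix, gmqK2] using h2
            have hn3 : ¬ ("treatment".toList).isPrefixOf (c :: t) = true := by
              simpa [List.isPrefixOf_iff_prefix, gmqK3] using h3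
            have hscan : gmqScan (c :: t) = gmqR4 ++ gmqScan x := by
              rw [gmqScan, if_neg hn1, if_neg hn2, if_neg hn3, if_pos hp, hdx]; rfl
            rw [hA, hscan, ih x.length hxl x rfl]
          · have hA : gmqA (c :: t) = c :: gmqA t := by
              unfold gmqA
              rw [gmqRep_cons_neg _ _ _ _ h1,
                  gmqRep_cons_neg _ _ _ _
                    (gmqNoNew gmqK1 gmqR1 gmqK2 (by decide) (by decide) c t h2),
                  gmqRep_cons_neg _ _ _ _
                    (gmqNoNew gmqK2 gmqR2 gmqK3 (by decide) (by decide) c _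
                      (gmqNoNew gmqK1 gmqR1 gmqK3 (by decide) (by decide) c t h3)),
                  gmqRep_cons_neg _ _ _ _
                    (gmqNoNew gmqK3 gmqR3 gmqK4 (by decide) (by decide) c _
                      (gmqNoNew gmqK2 gmqR2 gmqK4 (by decide) (by decide) c _
                        (gmqNoNew gmqK1 gmqR1 gmqK4 (by decide) (by decide) c t h4)))]
            have hn1 : ¬ ("patient".toList).isPrefixOf (c :: t) = true := by
              simpa [List.isPrefixOf_iff_prefix, gmqK1] using h1
            have hn2 : ¬ ("diagnosis".toList).isPrefixOf (c :: t) = true := by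
              simpa [List.isPrefixOf_iff_prefix, gmqK2] using h2
            have hn3 : ¬ ("treatment".toList).isPrefixOf (c :: t) = true := by
              simpa [List.isPrefixOf_iff_prefix, gmqK3] using h3
            have hn4 : ¬ ("symptoms".toList).isPrefixOf (c :: t) = true := by
              simpa [List.isPrefixOf_iff_prefix, gmqK4] using h4
            have hscan : gmqScan (c :: t) = c :: gmqScan t := by
              rw [gmqScan, if_neg hn1, if_neg hn2, if_neg hn3, if_neg hn4]
            rw [hA, hscan, ih t.length (by simp) t rfl]

-- ===== VERDICT (by name: the statement is the Claim_ definition above) =====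
theorem generalize_medical_query_spec : Claim_equal_generalize_medical_query := by
  intro query _
  show _ = _
  unfold generalize_medical_query generalize_medical_query_alt
  simp only [PySem.Str.replace, String.toList_ofList]
  rw [replace_eq_gmqRep _ _ _ (by decide), replace_eq_gmqRep _ _ _ (by decide),
      replace_eq_gmqRep _ _ _ (by decide), replace_eq_gmqRep _ _ _ (by decide)]
  rw [show ∀ l, gmqRep ("symptoms".toList) ("clinical presentation".toList)
        (gmqRep ("treatment".toList) ("medical intervention".toList)
          (gmqRep ("diagnosis".toList) ("medical condition".toList)
            (gmqRep ("patient".toList) ("individual".toList) l))) = gmqA l from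
      fun l => rfl,
    gmqA_eq_scan]
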